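-- pv_equiv track=rewrite | github.com/garymooney/qmuvi | qmuvi/musical_processing.py | note_map_f_minor
-- ===== SOURCE A (Python) =====
-- def note_map_f_minor(n: int) -> int:
--     """Map `n` to a note in the F minor scale. It starts at middle C.
--
--     Parameters
--     ----------
--         n
--             The integer to be mapped to a note.
--
--     Returns
--     -------
--         The note mapped to from `n`.
--     """
--     F_MIN = [
--         5,
--         7,
--         8,
--         10,
--         12,
--         13,
--         15,
--         17,
--         19,
--         20,
--         22,
--         24,
--         25,
--         27,
--         29,
--         31,
--         32,
--         34,
--         36,
--         37,
--         39,
--         41,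
--         43,
--         44,
--         46,
--         48,
--         49,
--         51,
--         53,
--         55,
--         56,
--         58,
--         60,
--         61,
--         63,
--         65,
--         67,
--         68,
--         70,
--         72,
--         74,
--         75,
--         77,
--         79,
--         80,
--         82,
--         84,
--         86,
--         87,
--         89,
--         91,
--         92,
--         94,
--         96,
--         97,
--         99,
--         101,
--         103,
--         104,
--         106,
--         108,
--         109,
--         111,
--         113,
--         115,
--         116,
--         118,
--         120,
--         121,
--         123,
--         125,
--         127,
--     ]
--     CURR_MODE = F_MIN
--     note = 60 + n
--     # Shifting
--     if CURR_MODE and note < CURR_MODE[0]: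
--         note = CURR_MODE[0]
--     else:
--         while CURR_MODE and note not in CURR_MODE:
--             note -= 1
--     return note
-- ===== SOURCE B (Python) =====
-- def note_map_f_minor(n: int) -> int:
--     """Map `n` to a note in the F minor scale. It starts at middle C.
--
--     Binary-search (bisect_right style) floor lookup in the sorted scale
--     list, instead of a one-at-a-time decrement scan.
--     """
--     F_MIN = [
--         5, 7, 8, 10, 12, 13, 15, 17, 19, 20, 22, 24, 25, 27, 29, 31,
--         32, 34, 36, 37, 39, 41, 43, 44, 46, 48, 49, 51, 53, 55, 56, 58,
--         60, 61, 63, 65, 67, 68, 70, 72, 74, 75, 77, 79, 80, 82, 84, 86,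
--         87, 89, 91, 92, 94, 96, 97, 99, 101, 103, 104, 106, 108, 109,
--         111, 113, 115, 116, 118, 120, 121, 123, 125, 127,
--     ]
--     note = 60 + n
--     if note <= F_MIN[0]:
--         return F_MIN[0]
--     if note >= F_MIN[-1]:
--         return F_MIN[-1]
--     lo, hi = 0, len(F_MIN)
--     while lo < hi:
--         mid = (lo + hi) // 2
--         if F_MIN[mid] <= note:
--             lo = mid + 1
--         else:
--             hi = mid
--     return F_MIN[lo - 1]
-- ===== Notes on version B (the rewrite author's own statement) =====
-- stated objective: faster
-- what changed: Replaces A's one-at-a-time decrement scan with membership tests (and its unbounded downward walk for notes above 127) by a clamped bisect_right-style binary-search floor lookup in the sorted scale list.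
import Mathlib
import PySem

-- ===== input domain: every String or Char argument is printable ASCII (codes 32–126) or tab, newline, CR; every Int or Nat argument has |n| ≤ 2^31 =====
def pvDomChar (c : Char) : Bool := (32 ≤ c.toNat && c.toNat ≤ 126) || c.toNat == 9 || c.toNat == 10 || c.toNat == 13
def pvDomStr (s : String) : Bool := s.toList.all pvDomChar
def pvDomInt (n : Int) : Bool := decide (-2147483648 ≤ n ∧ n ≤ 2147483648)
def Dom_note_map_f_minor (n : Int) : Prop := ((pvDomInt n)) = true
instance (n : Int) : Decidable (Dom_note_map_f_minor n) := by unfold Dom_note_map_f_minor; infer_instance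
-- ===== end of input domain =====

-- B replaces A's decrement-and-membership scan by a binary-search floor lookup in the sorted scale list (objective: faster).

-- ===== PORT A =====
-- The F minor scale list (A's local constant F_MIN = CURR_MODE).
def fMinScale : List Int := [5, 7, 8, 10, 12, 13, 15, 17, 19, 20, 22, 24, 25, 27, 29, 31, 32, 34, 36, 37, 39, 41, 43, 44, 46, 48, 49, 51, 53, 55, 56, 58, 60, 61, 63, 65, 67, 68, 70, 72, 74, 75, 77, 79, 80, 82, 84, 86, 87, 89, 91, 92, 94, 96, 97, 99, 101, 103, 104, 106, 108, 109, 111, 113, 115, 116, 118, 120, 121, 123, 125, 127]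

-- A's `while CURR_MODE and note not in CURR_MODE: note -= 1` loop; fuel makes the
-- recursion structural (the fuel supplied below always suffices, as the proofs show).
def noteLoopA : Nat → Int → Int
  | 0, note => note
  | fuel + 1, note => if note ∈ fMinScale then note else noteLoopA fuel (note - 1)

def note_map_f_minor (n : Int) : Int :=
  let note := 60 + n
  if note < 5 then 5  -- CURR_MODE[0] = 5 (the list is nonempty)
  else noteLoopA ((note - 5).toNat + 1) note

-- ===== PORT B =====
-- bisect_right-style binary search: while lo < hi loop, fuel = hi - lo suffices.
def bisectLoop : Nat → Int → Nat → Nat → Nat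
  | 0, _, lo, _ => lo
  | fuel + 1, note, lo, hi =>
    if lo < hi then
      let mid := (lo + hi) / 2
      if fMinScale.getD mid 0 ≤ note then bisectLoop fuel note (mid + 1) hi
      else bisectLoop fuel note lo mid
    else lo

def note_map_f_minor_alt (n : Int) : Int :=
  let note := 60 + n
  if note ≤ fMinScale.getD 0 0 then fMinScale.getD 0 0
  else if fMinScale.getD (fMinScale.length - 1) 0 ≤ note then
    fMinScale.getD (fMinScale.length - 1) 0
  else
    fMinScale.getD (bisectLoop fMinScale.length note 0 fMinScale.length - 1) 0

-- ===== PRECONDITION & SPEC =====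
def Spec_note_map_f_minor (n : Int) (out : Int) : Prop := out = note_map_f_minor_alt n
instance (n : Int) (out : Int) : Decidable (Spec_note_map_f_minor n out) := by unfold Spec_note_map_f_minor; infer_instance

-- ===== CLAIM (what is proved, stated in full; the proofs are below) =====
def Claim_equal_note_map_f_minor : Prop := ∀ (n : Int), Dom_note_map_f_minor n → Spec_note_map_f_minor n (note_map_f_minor n)

-- ===== LEMMAS AND PROOFS =====

-- Every scale note is ≤ 127, and 127 is in the scale.
theorem mem_fMinScale_le (note : Int) (h : note ∈ fMinScale) : note ≤ 127 := by
  simp [fMinScale] at h; omega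

-- A's loop returns 127 from any start ≥ 127 (it decrements down to 127).
theorem noteLoopA_ge127 (fuel : Nat) (note : Int) (h : 127 ≤ note)
    (hf : (note - 127).toNat < fuel) : noteLoopA fuel note = 127 := by
  induction fuel generalizing note with
  | zero => omega
  | succ k ih =>
    by_cases hm : note ∈ fMinScale
    · have := mem_fMinScale_le note hm
      have he : note = 127 := le_antisymm this h
      subst he
      simp only [noteLoopA, if_pos (by decide : (127 : Int) ∈ fMinScale)]
    · have h127 : (127 : Int) ∈ fMinScale := by decide
      have hne : note ≠ 127 := fun e => hm (e ▸ h127)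
      simp only [noteLoopA, hm, if_false]
      exact ih (note - 1) (by omega) (by omega)

-- On the bounded band 5 ≤ 60+n ≤ 127 both programs are checked value by value.
theorem band_eq (n : Int) (h1 : -55 ≤ n) (h2 : n ≤ 67) :
    note_map_f_minor n = note_map_f_minor_alt n := by
  interval_cases n <;> decide

-- ===== VERDICT (by name: the statement is the Claim_ definition above) =====
theorem note_map_f_minor_spec : Claim_equal_note_map_f_minor := by
  intro n _
  unfold Spec_note_map_f_minor
  by_cases hlo : 60 + n < 5
  · -- note < 5: A clamps to 5; B's first guard (note ≤ 5) returns 5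
    have hb : 60 + n ≤ (5 : Int) := by omega
    simp [note_map_f_minor, note_map_f_minor_alt, hlo, hb, fMinScale]
  · by_cases hhi : 60 + n ≤ 127
    · exact band_eq n (by omega) (by omega)
    · -- note ≥ 128: A walks down to 127; B's last-element guard returns 127
      have hA : note_map_f_minor n = 127 := by
        simp only [note_map_f_minor, if_neg hlo]
        exact noteLoopA_ge127 _ (60 + n) (by omega) (by omega)
      have hg1 : ¬ (60 + n ≤ (5 : Int)) := by omega
      have hg2 : (127 : Int) ≤ 60 + n := by omega
      rw [hA]
      simp [note_map_f_minor_alt, hg1, hg2, fMinScale]
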